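-- pv_equiv track=rewrite | github.com/Vadim2019-blip/PythTask | 03.1.FunctionsStringsIO/count_util/count_util.py | count_util
-- ===== SOURCE A (Python) =====
-- import typing as tp
--
-- def count_util(text: str, flags: tp.Optional[str] = None) -> dict[str, int]:
--     """
--     :param text: text to count entities
--     :param flags: flags in command-like format - can be:
--         * -m stands for counting characters
--         * -l stands for counting lines
--         * -L stands for getting length of the longest line
--         * -w stands for counting words
--     More than one flag can be passed at the same time, for example:
--         * "-l -m"
--         * "-lLw"
--     Ommiting flags or passing empty string is equivalent to "-mlLw"
--     :return: mapping from string keys to corresponding counter, where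
--     keys are selected according to the received flags:
--         * "chars" - amount of characters
--         * "lines" - amount of lines
--         * "longest_line" - the longest line length
--         * "words" - amount of words
--     """
--     lines = text.split('\n') if text and text[-1] != "\n" else text.split('\n')[:-1]
--     answer = dict()
--     counter = len(lines)
--     if (flags is None) or (flags == '') or ('m' in flags):
--         answer['chars'] = counter + sum(map(len, lines))
--         if text and not (text[-1] == "\n"):
--             answer['chars'] -= 1
--     if (flags is None) or (flags == '') or ('l' in flags):
--         answer['lines'] = counter - 1 if text and not (text[-1] == "\n") else counter
--
--     if (flags is None) or (flags == '') or ('w' in flags):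
--         answer['words'] = sum(len(it.split()) for it in lines) if lines else 0
--
--     if (flags is None) or (flags == '') or ('L' in flags):
--         answer['longest_line'] = max([len(x) for x in lines]) if lines else 0
--
--     return answer
-- ===== SOURCE B (Python) =====
-- import typing as tp
--
-- def count_util(text: str, flags: tp.Optional[str] = None) -> dict[str, int]:
--     answer = dict()
--     if (flags is None) or (flags == '') or ('m' in flags):
--         answer['chars'] = len(text)
--     if (flags is None) or (flags == '') or ('l' in flags):
--         answer['lines'] = text.count('\n')
--     if (flags is None) or (flags == '') or ('w' in flags):
--         answer['words'] = len(text.split())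
--     if (flags is None) or (flags == '') or ('L' in flags):
--         answer['longest_line'] = max(len(line) for line in text.split('\n'))
--     return answer
-- ===== Notes on version B (the rewrite author's own statement) =====
-- stated objective: idiomatic
-- what changed: B drops A's quirky lines-list construction and counter arithmetic: each metric is computed directly in closed form (chars = len(text), lines = newline count of text, words = length of text.split(), longest_line = max over the line lengths), with the same flag branches.
import Mathlib
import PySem

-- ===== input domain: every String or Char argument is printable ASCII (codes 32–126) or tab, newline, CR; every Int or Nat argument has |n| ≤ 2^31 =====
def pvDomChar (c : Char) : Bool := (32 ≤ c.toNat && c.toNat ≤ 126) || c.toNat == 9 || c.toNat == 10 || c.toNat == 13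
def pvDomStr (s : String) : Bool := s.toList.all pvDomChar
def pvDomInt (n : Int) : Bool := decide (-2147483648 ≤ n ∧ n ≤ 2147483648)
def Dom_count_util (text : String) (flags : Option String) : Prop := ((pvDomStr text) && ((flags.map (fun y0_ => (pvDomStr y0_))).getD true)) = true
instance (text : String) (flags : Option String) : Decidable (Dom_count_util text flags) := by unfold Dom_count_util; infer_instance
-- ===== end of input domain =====

-- B computes each metric in closed form (len / count / split length / max of line lengths) instead of
-- A's lines-list construction with counter arithmetic; objective: idiomatic, same O(n) cost.


-- shared transliteration of the flag test both Pythons write inline: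
-- (flags is None) or (flags == '') or (c in flags)
def pvHasFlag (flags : Option String) (c : String) : Bool :=
  match flags with
  | none => true
  | some f => (f == "") || PySem.Str.isIn c f

-- ===== PORT A =====
-- Python A's condition `text and text[-1] != "\n"` (also reused as `text and not (text[-1] == "\n")`)
def pvTail (t : List Char) : Bool := (!t.isEmpty) && !(PySem.List.pyGet? t (-1) == some '\n')

def count_util (text : String) (flags : Option String) : List (String × Int) :=
  let t := text.toList
  -- lines = text.split('\n') if text and text[-1] != "\n" else text.split('\n')[:-1]
  let lines : List (List Char) :=
    if pvTail t then PySem.Chars.splitOn t ['\n']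
    else PySem.List.slice (PySem.Chars.splitOn t ['\n']) none (some (-1))
  let answer : PySem.Dict String Int := PySem.Dict.empty
  let counter : Int := (lines.length : Int)
  let answer :=
    if pvHasFlag flags "m" then
      let answer := answer.insert "chars" (counter + (lines.map PySem.Chars.len).sum)
      if pvTail t then answer.modify "chars" 0 (· - 1) else answer
    else answer
  let answer :=
    if pvHasFlag flags "l" then
      answer.insert "lines" (if pvTail t then counter - 1 else counter)
    else answer
  let answer :=
    if pvHasFlag flags "w" then
      answer.insert "words"
        (if !lines.isEmpty then (lines.map (fun it => ((PySem.Chars.split₀ it).length : Int))).sum else 0)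
    else answer
  let answer :=
    if pvHasFlag flags "L" then
      answer.insert "longest_line"
        -- max([...]) on a nonempty list; .getD 0 only extracts the always-`some` result
        (if !lines.isEmpty then (PySem.List.max? (lines.map PySem.Chars.len) id).getD 0 else 0)
    else answer
  answer.items

-- ===== PORT B =====
def count_util_alt (text : String) (flags : Option String) : List (String × Int) :=
  let t := text.toList
  let answer : PySem.Dict String Int := PySem.Dict.empty
  let answer := if pvHasFlag flags "m" then answer.insert "chars" (PySem.Chars.len t) else answer
  let answer := if pvHasFlag flags "l" then answer.insert "lines" ((PySem.Chars.count t ['\n'] : Nat) : Int) else answer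
  let answer := if pvHasFlag flags "w" then answer.insert "words" (((PySem.Chars.split₀ t).length : Nat) : Int) else answer
  let answer :=
    if pvHasFlag flags "L" then
      -- max over text.split('\n'), which is never empty; .getD 0 only extracts the always-`some` result
      answer.insert "longest_line" ((PySem.List.max? ((PySem.Chars.splitOn t ['\n']).map PySem.Chars.len) id).getD 0)
    else answer
  answer.items

-- ===== PRECONDITION & SPEC =====
def Spec_count_util (text : String) (flags : Option String) (out : List (String × Int)) : Prop := out = count_util_alt text flags
instance (text : String) (flags : Option String) (out : List (String × Int)) : Decidable (Spec_count_util text flags out) := by unfold Spec_count_util; infer_instance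

-- ===== CLAIM (what is proved, stated in full; the proofs are below) =====
def Claim_equal_count_util : Prop := ∀ (text : String) (flags : Option String), Dom_count_util text flags → Spec_count_util text flags (count_util text flags)

-- ===== LEMMAS AND PROOFS =====

-- `text.split('\n')`, structurally
def mySplit : List Char → List (List Char)
  | [] => [[]]
  | c :: r =>
    if c = '\n' then [] :: mySplit r
    else
      match mySplit r with
      | [] => [[c]]
      | p :: ps => (c :: p) :: ps

lemma mySplit_ne_nil (t : List Char) : mySplit t ≠ [] := by
  cases t with
  | nil => simp [mySplit]
  | cons c r =>
    simp only [mySplit]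
    split
    · simp
    · split <;> simp

-- word counter with an "inside a word" state
def wgo : List Char → Bool → Nat
  | [], b => if b then 1 else 0
  | c :: r, b => if PySem.Chars.isspace c then (if b then 1 else 0) + wgo r false else wgo r true

lemma splitOn_go_eq (fuel : Nat) : ∀ (l cur acc : List Char) (accs : List (List Char)),
    l.length < fuel →
    PySem.Chars.splitOn.go ['\n'] fuel l cur accs =
      accs.reverse ++ (match mySplit l with
        | [] => [cur.reverse]
        | p :: ps => (cur.reverse ++ p) :: ps) := by
  induction fuel with
  | zero => intro l cur acc accs h; omega
  | succ n ih =>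
    intro l cur acc accs h
    cases l with
    | nil => simp [PySem.Chars.splitOn.go, mySplit]
    | cons c r =>
      by_cases hc : c = '\n'
      · subst hc
        rw [PySem.Chars.splitOn.go]
        simp only [List.isPrefixOf, BEq.rfl, Bool.true_and, List.isPrefixOf_nil_left, if_true,
          List.length_cons, List.drop_succ_cons, List.drop_zero, List.length_nil]
        rw [ih r [] acc (cur.reverse :: accs) (by simp at h ⊢; omega)]
        simp only [mySplit, if_true, reduceIte]
        cases hms : mySplit r with
        | nil => exact absurd hms (mySplit_ne_nil r)
        | cons p ps => simp
      · rw [PySem.Chars.splitOn.go]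
        have hpre : ['\n'].isPrefixOf (c :: r) = false := by
          simp [List.isPrefixOf]; exact fun hh => (hc hh.symm).elim
        simp only [hpre, Bool.false_eq_true, if_false]
        rw [ih r (c :: cur) acc accs (by simp at h ⊢; omega)]
        simp only [mySplit, hc, if_false, reduceIte]
        cases hms : mySplit r with
        | nil => exact absurd hms (mySplit_ne_nil r)
        | cons p ps => simp

lemma splitOn_eq_mySplit (t : List Char) : PySem.Chars.splitOn t ['\n'] = mySplit t := by
  have h := splitOn_go_eq (t.length + 1) t [] [] [] (by omega)
  rw [PySem.Chars.splitOn] at *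
  rw [h]
  cases hms : mySplit t with
  | nil => exact absurd hms (mySplit_ne_nil t)
  | cons p ps => simp

lemma count_go_eq (fuel : Nat) : ∀ (l : List Char) (acc : Nat),
    l.length ≤ fuel →
    PySem.Chars.count.go ['\n'] fuel l acc = acc + l.count '\n' := by
  induction fuel with
  | zero =>
    intro l acc h
    have : l = [] := by cases l <;> simp_all
    subst this; simp [PySem.Chars.count.go]
  | succ n ih =>
    intro l acc h
    cases l with
    | nil => simp [PySem.Chars.count.go]
    | cons c r =>
      by_cases hc : c = '\n'
      · subst hc
        rw [PySem.Chars.count.go]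
        simp only [List.isPrefixOf, BEq.rfl, Bool.true_and, List.isPrefixOf_nil_left, if_true,
          List.length_cons, List.drop_succ_cons, List.drop_zero, List.length_nil]
        rw [ih r (acc + 1) (by simp at h ⊢; omega)]
        simp [List.count_cons]; omega
      · rw [PySem.Chars.count.go]
        have hpre : ['\n'].isPrefixOf (c :: r) = false := by
          simp [List.isPrefixOf]; exact fun hh => (hc hh.symm).elim
        simp only [hpre, Bool.false_eq_true, if_false]
        rw [ih r acc (by simp at h ⊢; omega)]
        simp [List.count_cons, hc]

lemma count_eq_count (t : List Char) : PySem.Chars.count t ['\n'] = t.count '\n' := by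
  rw [PySem.Chars.count]
  simp only [List.isEmpty_cons, Bool.false_eq_true, if_false]
  simpa using count_go_eq t.length t 0 le_rfl

lemma length_mySplit (t : List Char) : (mySplit t).length = t.count '\n' + 1 := by
  induction t with
  | nil => simp [mySplit]
  | cons c r ih =>
    simp only [mySplit]
    by_cases hc : c = '\n'
    · subst hc; simp [List.count_cons, ih]
    · simp only [hc, if_false, reduceIte]
      cases hms : mySplit r with
      | nil => exact absurd hms (mySplit_ne_nil r)
      | cons p ps => rw [hms] at ih; simp [List.count_cons, hc] at ih ⊢; omega

lemma sum_len_mySplit (t : List Char) : ((mySplit t).map List.length).sum + t.count '\n' = t.length := by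
  induction t with
  | nil => simp [mySplit]
  | cons c r ih =>
    simp only [mySplit]
    by_cases hc : c = '\n'
    · subst hc; simp only [if_true, reduceIte, List.map_cons, List.sum_cons, List.length_nil,
        List.count_cons, List.length_cons, BEq.rfl, if_true]
      omega
    · simp only [hc, if_false, reduceIte]
      cases hms : mySplit r with
      | nil => exact absurd hms (mySplit_ne_nil r)
      | cons p ps =>
        rw [hms] at ih
        simp only [List.map_cons, List.sum_cons, List.length_cons, List.count_cons] at ih ⊢
        simp [hc]; omega

lemma split₀_go_len : ∀ (l cur : List Char) (acc : List (List Char)),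
    (PySem.Chars.split₀.go l cur acc).length = acc.length + wgo l (!cur.isEmpty) := by
  intro l
  induction l with
  | nil =>
    intro cur acc
    rw [PySem.Chars.split₀.go]
    cases cur <;> simp [wgo]
  | cons c r ih =>
    intro cur acc
    rw [PySem.Chars.split₀.go]
    by_cases hs : PySem.Chars.isspace c
    · simp only [hs, if_true, reduceIte, wgo]
      cases cur <;> simp [ih] <;> omega
    · simp only [hs, Bool.false_eq_true, if_false, wgo]
      rw [ih]
      simp [hs]

lemma split₀_len (t : List Char) : (PySem.Chars.split₀ t).length = wgo t false := by
  have h := split₀_go_len t [] []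
  simpa [PySem.Chars.split₀] using h

lemma sum_w : ∀ (t : List Char) (b : Bool) (p : List Char) (ps : List (List Char)),
    mySplit t = p :: ps →
    wgo p b + ((ps.map (fun q => wgo q false)).sum) = wgo t b := by
  intro t
  induction t with
  | nil =>
    intro b p ps hps
    simp only [mySplit] at hps
    injection hps with h1 h2; subst h1; subst h2
    simp [wgo]
  | cons c r ih =>
    intro b p ps hps
    cases hms : mySplit r with
    | nil => exact absurd hms (mySplit_ne_nil r)
    | cons p' ps' =>
      have h := ih false p' ps' hms
      by_cases hc : c = '\n'
      · subst hc
        rw [show mySplit ('\n' :: r) = [] :: mySplit r from by simp [mySplit], hms] at hps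
        injection hps with h1 h2; subst h1; subst h2
        simp only [wgo, show PySem.Chars.isspace '\n' = true from by decide, if_true,
          List.map_cons, List.sum_cons]
        omega
      · rw [show mySplit (c :: r) = (c :: p') :: ps' from by
          simp only [mySplit, hc, if_false, reduceIte]; rw [hms]] at hps
        injection hps with h1 h2; subst h1; subst h2
        by_cases hs : PySem.Chars.isspace c
        · simp only [wgo, hs, if_true]
          omega
        · have h' := ih true p' ps' hms
          simp only [wgo, hs, Bool.false_eq_true, if_false]
          omega

lemma sum_w0 (t : List Char) : ((mySplit t).map (fun q => wgo q false)).sum = wgo t false := by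
  cases hms : mySplit t with
  | nil => exact absurd hms (mySplit_ne_nil t)
  | cons p ps =>
    rw [List.map_cons, List.sum_cons]
    exact sum_w t false p ps hms

lemma wgo_append_nl : ∀ (s : List Char) (b : Bool), wgo (s ++ ['\n']) b = wgo s b := by
  intro s
  induction s with
  | nil => intro b; simp [wgo, show PySem.Chars.isspace '\n' = true from by decide]
  | cons c r ih => intro b; simp only [List.cons_append, wgo, ih]

lemma mySplit_append_nl : ∀ (s : List Char), mySplit (s ++ ['\n']) = mySplit s ++ [[]] := by
  intro s
  induction s with
  | nil => simp [mySplit]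
  | cons c r ih =>
    by_cases hc : c = '\n'
    · subst hc; simp [mySplit, ih]
    · simp only [List.cons_append, mySplit, hc, if_false, reduceIte, ih]
      cases hms : mySplit r with
      | nil => exact absurd hms (mySplit_ne_nil r)
      | cons p ps => simp

lemma max?_step (y x : Int) (r : List Int) :
    PySem.List.max? (y :: x :: r) id = PySem.List.max? (max y x :: r) id := by
  simp only [PySem.List.max?, List.foldl_cons, id_eq]
  split_ifs with h
  · rw [max_eq_right (le_of_lt h)]
  · rw [max_eq_left (not_lt.mp h)]

lemma max?_cons_eq (y : Int) (ys : List Int) :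
    PySem.List.max? (y :: ys) id = some (ys.foldl max y) := by
  induction ys generalizing y with
  | nil => simp [PySem.List.max?]
  | cons x r ih =>
    rw [max?_step, ih, List.foldl_cons]

lemma sum_len_int (l : List (List Char)) : (l.map PySem.Chars.len).sum = (((l.map List.length).sum : Nat) : Int) := by
  induction l with
  | nil => simp
  | cons p r ih => simp [PySem.Chars.len, ih]

lemma sum_split₀_int (l : List (List Char)) :
    (l.map (fun it => ((PySem.Chars.split₀ it).length : Int))).sum =
      (((l.map (fun q => wgo q false)).sum : Nat) : Int) := by
  induction l with
  | nil => simp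
  | cons p r ih => simp [split₀_len, ih, Function.comp_def]

lemma pvTail_concat (s : List Char) (c : Char) : pvTail (s ++ [c]) = !(c == '\n') := by
  simp only [pvTail]
  have h1 : (s ++ [c]).isEmpty = false := by simp
  have h2 : PySem.List.pyGet? (s ++ [c]) (-1) = some c := by
    simp [PySem.List.pyGet?, PySem.List.pyIdx?]
  rw [h1, h2]
  simp

-- the common conditional-insert chain, with the four values abstracted (proof-side device)
def pvChain (flags : Option String) (v1 v2 v3 v4 : Int) : List (String × Int) :=
  (let a : PySem.Dict String Int := PySem.Dict.empty
   let a := if pvHasFlag flags "m" then a.insert "chars" v1 else a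
   let a := if pvHasFlag flags "l" then a.insert "lines" v2 else a
   let a := if pvHasFlag flags "w" then a.insert "words" v3 else a
   let a := if pvHasFlag flags "L" then a.insert "longest_line" v4 else a
   a).items

lemma B_eq_chain (text : String) (flags : Option String) :
    count_util_alt text flags = pvChain flags
      (PySem.Chars.len text.toList)
      ((PySem.Chars.count text.toList ['\n'] : Nat) : Int)
      (((PySem.Chars.split₀ text.toList).length : Nat) : Int)
      ((PySem.List.max? ((PySem.Chars.splitOn text.toList ['\n']).map PySem.Chars.len) id).getD 0) := rfl

def pvLinesA (t : List Char) : List (List Char) :=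
  if pvTail t then PySem.Chars.splitOn t ['\n']
  else PySem.List.slice (PySem.Chars.splitOn t ['\n']) none (some (-1))

lemma insert_modify_chars (x : Int) (b : Bool) :
    (if b then ((PySem.Dict.empty.insert "chars" x).modify "chars" 0 (· - 1))
     else PySem.Dict.empty.insert "chars" x) =
      PySem.Dict.empty.insert "chars" (if b then x - 1 else x) := by
  cases b <;>
    simp [PySem.Dict.modify, PySem.Dict.insert, PySem.Dict.contains, PySem.Dict.getD,
      PySem.Dict.get?, PySem.Dict.empty]

lemma A_eq_chain (text : String) (flags : Option String) :
    count_util text flags = pvChain flags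
      (if pvTail text.toList
        then ((pvLinesA text.toList).length : Int) + ((pvLinesA text.toList).map PySem.Chars.len).sum - 1
        else ((pvLinesA text.toList).length : Int) + ((pvLinesA text.toList).map PySem.Chars.len).sum)
      (if pvTail text.toList then ((pvLinesA text.toList).length : Int) - 1
        else ((pvLinesA text.toList).length : Int))
      (if !(pvLinesA text.toList).isEmpty
        then ((pvLinesA text.toList).map (fun it => ((PySem.Chars.split₀ it).length : Int))).sum else 0)
      (if !(pvLinesA text.toList).isEmpty
        then (PySem.List.max? ((pvLinesA text.toList).map PySem.Chars.len) id).getD 0 else 0) := by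
  simp only [count_util, pvChain, pvLinesA]
  by_cases hm : pvHasFlag flags "m"
  · simp only [hm, if_true, reduceIte]
    rw [insert_modify_chars]
  · simp [hm]

-- the four value equalities
lemma linesA_nl (s : List Char) :
    pvLinesA (s ++ ['\n']) = mySplit s := by
  have hbe : pvTail (s ++ ['\n']) = false := by rw [pvTail_concat]; simp
  simp only [pvLinesA, hbe, Bool.false_eq_true, if_false, reduceIte]
  rw [splitOn_eq_mySplit, mySplit_append_nl, PySem.List.slice_to_neg_one,
    List.dropLast_concat]

lemma linesA_mid (s : List Char) (c : Char) (hc : c ≠ '\n') :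
    pvLinesA (s ++ [c]) = mySplit (s ++ [c]) := by
  have hbe : pvTail (s ++ [c]) = true := by rw [pvTail_concat]; simpa using hc
  simp only [pvLinesA, hbe, if_true, reduceIte]
  exact splitOn_eq_mySplit _

lemma mySplit_isEmpty (u : List Char) : (mySplit u).isEmpty = false := by
  cases hms : mySplit u with
  | nil => exact absurd hms (mySplit_ne_nil u)
  | cons p ps => simp

lemma val_chars (t : List Char) :
    (if pvTail t
      then ((pvLinesA t).length : Int) + ((pvLinesA t).map PySem.Chars.len).sum - 1
      else ((pvLinesA t).length : Int) + ((pvLinesA t).map PySem.Chars.len).sum) =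
      PySem.Chars.len t := by
  rcases List.eq_nil_or_concat t with h | ⟨s, c, h⟩
  · subst h; decide
  · rw [List.concat_eq_append] at h; subst h
    by_cases hc : c = '\n'
    · subst hc
      have hbe : pvTail (s ++ ['\n']) = false := by rw [pvTail_concat]; simp
      rw [hbe, if_neg (by simp), linesA_nl, sum_len_int]
      have h1 := length_mySplit s
      have h2 := sum_len_mySplit s
      simp only [PySem.Chars.len, List.length_append, List.length_cons, List.length_nil]
      omega
    · have hbe : pvTail (s ++ [c]) = true := by rw [pvTail_concat]; simpa using hc
      rw [hbe, if_pos rfl, linesA_mid s c hc, sum_len_int]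
      have h1 := length_mySplit (s ++ [c])
      have h2 := sum_len_mySplit (s ++ [c])
      simp only [PySem.Chars.len]
      omega

lemma val_lines (t : List Char) :
    (if pvTail t then ((pvLinesA t).length : Int) - 1 else ((pvLinesA t).length : Int)) =
      ((PySem.Chars.count t ['\n'] : Nat) : Int) := by
  rw [count_eq_count]
  rcases List.eq_nil_or_concat t with h | ⟨s, c, h⟩
  · subst h; decide
  · rw [List.concat_eq_append] at h; subst h
    by_cases hc : c = '\n'
    · subst hc
      have hbe : pvTail (s ++ ['\n']) = false := by rw [pvTail_concat]; simp
      rw [hbe, if_neg (by simp), linesA_nl]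
      have h1 := length_mySplit s
      have h3 : (s ++ ['\n']).count '\n' = s.count '\n' + 1 := by simp [List.count_append]
      rw [h3]
      omega
    · have hbe : pvTail (s ++ [c]) = true := by rw [pvTail_concat]; simpa using hc
      rw [hbe, if_pos rfl, linesA_mid s c hc]
      have h1 := length_mySplit (s ++ [c])
      omega

lemma val_words (t : List Char) :
    (if !(pvLinesA t).isEmpty
      then ((pvLinesA t).map (fun it => ((PySem.Chars.split₀ it).length : Int))).sum else 0) =
      (((PySem.Chars.split₀ t).length : Nat) : Int) := by
  rw [split₀_len]
  rcases List.eq_nil_or_concat t with h | ⟨s, c, h⟩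
  · subst h; decide
  · rw [List.concat_eq_append] at h; subst h
    by_cases hc : c = '\n'
    · subst hc
      rw [linesA_nl, wgo_append_nl, mySplit_isEmpty]
      simp only [Bool.not_false, if_true, reduceIte]
      rw [sum_split₀_int, sum_w0]
    · rw [linesA_mid s c hc, mySplit_isEmpty]
      simp only [Bool.not_false, if_true, reduceIte]
      rw [sum_split₀_int, sum_w0]

lemma val_longest (t : List Char) :
    (if !(pvLinesA t).isEmpty
      then (PySem.List.max? ((pvLinesA t).map PySem.Chars.len) id).getD 0 else 0) =
      (PySem.List.max? ((PySem.Chars.splitOn t ['\n']).map PySem.Chars.len) id).getD 0 := by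
  rw [splitOn_eq_mySplit]
  rcases List.eq_nil_or_concat t with h | ⟨s, c, h⟩
  · subst h; decide
  · rw [List.concat_eq_append] at h; subst h
    by_cases hc : c = '\n'
    · subst hc
      rw [linesA_nl, mySplit_isEmpty]
      simp only [Bool.not_false, if_true, reduceIte]
      rw [mySplit_append_nl]
      cases hms : mySplit s with
      | nil => exact absurd hms (mySplit_ne_nil s)
      | cons p ps =>
        simp only [List.cons_append, List.map_cons, List.map_append, List.map_nil]
        rw [max?_cons_eq, max?_cons_eq]
        simp only [Option.getD_some]
        rw [show PySem.Chars.len [] = (0 : Int) from rfl, List.foldl_append]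
        simp only [List.foldl_cons, List.foldl_nil]
        have hp : (0 : Int) ≤ PySem.Chars.len p := by simp [PySem.Chars.len]
        have h0 : (0 : Int) ≤ (ps.map PySem.Chars.len).foldl max (PySem.Chars.len p) :=
          le_trans hp (PySem.List.le_foldl_max (ps.map PySem.Chars.len) (PySem.Chars.len p)).1
        rw [max_eq_left h0]
    · rw [linesA_mid s c hc, mySplit_isEmpty]
      simp only [Bool.not_false, if_true, reduceIte]

-- ===== VERDICT (by name: the statement is the Claim_ definition above) =====
theorem count_util_spec : Claim_equal_count_util := by
  intro text flags _hdom
  unfold Spec_count_util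
  rw [A_eq_chain, B_eq_chain, val_chars, val_lines, val_words, val_longest]
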